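-- pv_equiv track=rewrite | github.com/Darshit02/autonomous-multi-agent-orchestration-system | backend/app/services/memory_intelligence.py | rank_memories
-- ===== SOURCE A (Python) =====
-- def rank_memories(memories: list[str], query: str):
--     ranked = []
--     for mem in memories:
--         score = 0
--         if any(word in mem.lower() for word in query.lower().split()):
--             score += 2
--         if len(mem) > 50:
--             score += 1
--         ranked.append((mem, score))
--     ranked.sort(key=lambda x: x[1], reverse=True)
--     return [m[0] for m in ranked]
-- ===== SOURCE B (Python) =====
-- def rank_memories(memories: list[str], query: str):
--     words = query.lower().split()
--     buckets = [[], [], [], []]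
--     for mem in memories:
--         score = (2 if any(w in mem.lower() for w in words) else 0) + (1 if len(mem) > 50 else 0)
--         buckets[score].append(mem)
--     return buckets[3] + buckets[2] + buckets[1] + buckets[0]
-- ===== Notes on version B (the rewrite author's own statement) =====
-- stated objective: faster
-- what changed: Replaces building a (memory, score) list and stable-sorting it by score with a single pass that drops each memory into one of four score buckets (scores are always 0..3) and concatenates the buckets high-to-low, which reproduces the stable descending sort exactly.
import Mathlib
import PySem

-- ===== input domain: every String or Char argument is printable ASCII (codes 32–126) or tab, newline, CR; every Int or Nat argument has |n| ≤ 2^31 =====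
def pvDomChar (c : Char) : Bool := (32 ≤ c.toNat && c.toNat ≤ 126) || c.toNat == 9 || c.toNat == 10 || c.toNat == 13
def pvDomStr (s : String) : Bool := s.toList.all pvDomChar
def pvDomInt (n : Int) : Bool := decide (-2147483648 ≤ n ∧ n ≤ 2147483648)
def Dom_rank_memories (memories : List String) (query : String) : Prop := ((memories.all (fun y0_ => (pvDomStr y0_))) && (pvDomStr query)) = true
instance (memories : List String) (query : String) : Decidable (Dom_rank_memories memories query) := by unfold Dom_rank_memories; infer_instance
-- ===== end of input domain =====

-- B replaces A's build-(memory,score)-pairs-then-stable-sort with a one-pass bucketing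
-- by the score 0..3 and a high-to-low concatenation of the buckets (objective: alternative).

-- ===== PORT A =====
-- A's loop body: score a memory and append the (mem, score) pair
def pvBodyA (query : String) (ranked : List (String × Int)) (mem : String) : List (String × Int) :=
  let score : Int := 0
  let score := if (PySem.Str.split₀ (PySem.Str.lower query)).any
      (fun word => PySem.Str.isIn word (PySem.Str.lower mem)) then score + 2 else score
  let score := if 50 < PySem.Str.len mem then score + 1 else score
  ranked ++ [(mem, score)]

def rank_memories (memories : List String) (query : String) : List String :=
  (PySem.List.sorted (memories.foldl (pvBodyA query) []) (fun x => x.2) true).map (fun m => m.1)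

-- ===== PORT B =====
-- B's loop body: score a memory and append it to the bucket of its score (buckets as a 4-tuple (b0,b1,b2,b3))
def pvBodyB (words : List String) (b : List String × List String × List String × List String)
    (mem : String) : List String × List String × List String × List String :=
  let score : Int :=
    (if words.any (fun w => PySem.Str.isIn w (PySem.Str.lower mem)) then 2 else 0)
    + (if 50 < PySem.Str.len mem then 1 else 0)
  if score = 3 then (b.1, b.2.1, b.2.2.1, b.2.2.2 ++ [mem])
  else if score = 2 then (b.1, b.2.1, b.2.2.1 ++ [mem], b.2.2.2)
  else if score = 1 then (b.1, b.2.1 ++ [mem], b.2.2.1, b.2.2.2)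
  else (b.1 ++ [mem], b.2.1, b.2.2.1, b.2.2.2)

def rank_memories_alt (memories : List String) (query : String) : List String :=
  let words := PySem.Str.split₀ (PySem.Str.lower query)
  let buckets := memories.foldl (pvBodyB words) ([], [], [], [])
  buckets.2.2.2 ++ buckets.2.2.1 ++ buckets.2.1 ++ buckets.1

-- ===== PRECONDITION & SPEC =====
def Spec_rank_memories (memories : List String) (query : String) (out : List String) : Prop := out = rank_memories_alt memories query
instance (memories : List String) (query : String) (out : List String) : Decidable (Spec_rank_memories memories query out) := by unfold Spec_rank_memories; infer_instance

-- ===== CLAIM (what is proved, stated in full; the proofs are below) =====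
def Claim_equal_rank_memories : Prop := ∀ (memories : List String) (query : String), Dom_rank_memories memories query → Spec_rank_memories memories query (rank_memories memories query)

-- ===== LEMMAS AND PROOFS =====

-- the per-memory score both programs compute
def pvScr (query mem : String) : Int :=
  (if (PySem.Str.split₀ (PySem.Str.lower query)).any
      (fun w => PySem.Str.isIn w (PySem.Str.lower mem)) then 2 else 0)
  + (if 50 < PySem.Str.len mem then 1 else 0)

theorem pvScr_cases (query mem : String) :
    pvScr query mem = 0 ∨ pvScr query mem = 1 ∨ pvScr query mem = 2 ∨ pvScr query mem = 3 := by
  unfold pvScr; split_ifs <;> norm_num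

theorem pvBodyA_eq (query : String) (ranked : List (String × Int)) (mem : String) :
    pvBodyA query ranked mem = ranked ++ [(mem, pvScr query mem)] := by
  unfold pvBodyA pvScr
  split_ifs <;> norm_num

theorem ins_append {α : Type} (before : α → α → Bool) (x : α) (pre suf : List α)
    (h : ∀ y ∈ pre, before x y = false) :
    PySem.List.insertBy before x (pre ++ suf) = pre ++ PySem.List.insertBy before x suf := by
  induction pre with
  | nil => simp
  | cons a t ih =>
      simp only [List.cons_append, PySem.List.insertBy, h a (by simp)]
      simp only [Bool.false_eq_true, if_false]
      rw [ih (fun y hy => h y (by simp [hy]))]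

theorem ins_front {α : Type} (before : α → α → Bool) (x : α) (ys : List α)
    (h : ∀ y ∈ ys, before x y = true) :
    PySem.List.insertBy before x ys = x :: ys := by
  cases ys with
  | nil => rfl
  | cons a t => simp [PySem.List.insertBy, h a (by simp)]

theorem foldl_ins_buckets (xs : List (String × Int)) (b3 b2 b1 b0 : List (String × Int))
    (h3 : ∀ p ∈ b3, p.2 = 3) (h2 : ∀ p ∈ b2, p.2 = 2)
    (h1 : ∀ p ∈ b1, p.2 = 1) (h0 : ∀ p ∈ b0, p.2 = 0)
    (hx : ∀ p ∈ xs, p.2 = 0 ∨ p.2 = 1 ∨ p.2 = 2 ∨ p.2 = 3) :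
    xs.foldl (fun acc x => PySem.List.insertBy (fun a b => decide (b.2 < a.2)) x acc)
        (b3 ++ (b2 ++ (b1 ++ b0)))
      = (b3 ++ xs.filter (fun p => decide (p.2 = 3)))
        ++ ((b2 ++ xs.filter (fun p => decide (p.2 = 2)))
        ++ ((b1 ++ xs.filter (fun p => decide (p.2 = 1)))
        ++ (b0 ++ xs.filter (fun p => decide (p.2 = 0))))) := by
  induction xs generalizing b3 b2 b1 b0 with
  | nil => simp
  | cons x t ih =>
      simp only [List.foldl_cons]
      rcases hx x (by simp) with hs | hs | hs | hs
      · -- score 0: x goes after every bucket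
        rw [ins_append _ _ b3 _ (by
              intro y hy
              simp [h3 y hy, hs]),
            ins_append _ _ b2 _ (by
              intro y hy
              simp [h2 y hy, hs]),
            ins_append _ _ b1 _ (by
              intro y hy
              simp [h1 y hy, hs]),
            PySem.List.insertBy_of_forall_not_before _ _ _ (by
              intro y hy
              simp [h0 y hy, hs])]
        rw [ih b3 b2 b1 (b0 ++ [x]) h3 h2 h1
              (by
                intro p hp
                rcases List.mem_append.1 hp with h | h
                · exact h0 p h
                · simp at h
                  simp [h, hs])
              (fun p hp => hx p (by simp [hp]))]
        simp [hs, List.append_assoc]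
      · -- score 1: x goes after b3, b2, b1 and before b0
        rw [ins_append _ _ b3 _ (by
              intro y hy
              simp [h3 y hy, hs]),
            ins_append _ _ b2 _ (by
              intro y hy
              simp [h2 y hy, hs]),
            ins_append _ _ b1 _ (by
              intro y hy
              simp [h1 y hy, hs]),
            ins_front _ _ b0 (by
              intro y hy
              simp [h0 y hy, hs])]
        rw [show b3 ++ (b2 ++ (b1 ++ (x :: b0))) = b3 ++ (b2 ++ ((b1 ++ [x]) ++ b0)) by simp]
        rw [ih b3 b2 (b1 ++ [x]) b0 h3 h2
              (by
                intro p hp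
                rcases List.mem_append.1 hp with h | h
                · exact h1 p h
                · simp at h
                  simp [h, hs])
              h0 (fun p hp => hx p (by simp [hp]))]
        simp [hs, List.append_assoc]
      · -- score 2: x goes after b3, b2 and before b1 ++ b0
        rw [ins_append _ _ b3 _ (by
              intro y hy
              simp [h3 y hy, hs]),
            ins_append _ _ b2 _ (by
              intro y hy
              simp [h2 y hy, hs]),
            ins_front _ _ (b1 ++ b0) (by
              intro y hy
              rcases List.mem_append.1 hy with h | h
              · simp [h1 y h, hs]
              · simp [h0 y h, hs])]
        rw [show b3 ++ (b2 ++ (x :: (b1 ++ b0))) = b3 ++ ((b2 ++ [x]) ++ (b1 ++ b0)) by simp]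
        rw [ih b3 (b2 ++ [x]) b1 b0 h3
              (by
                intro p hp
                rcases List.mem_append.1 hp with h | h
                · exact h2 p h
                · simp at h
                  simp [h, hs])
              h1 h0 (fun p hp => hx p (by simp [hp]))]
        simp [hs, List.append_assoc]
      · -- score 3: x goes after b3 and before everything else
        rw [ins_append _ _ b3 _ (by
              intro y hy
              simp [h3 y hy, hs]),
            ins_front _ _ (b2 ++ (b1 ++ b0)) (by
              intro y hy
              rcases List.mem_append.1 hy with h | h
              · simp [h2 y h, hs]
              · rcases List.mem_append.1 h with h' | h'
                · simp [h1 y h', hs]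
                · simp [h0 y h', hs])]
        rw [show b3 ++ (x :: (b2 ++ (b1 ++ b0))) = (b3 ++ [x]) ++ (b2 ++ (b1 ++ b0)) by simp]
        rw [ih (b3 ++ [x]) b2 b1 b0
              (by
                intro p hp
                rcases List.mem_append.1 hp with h | h
                · exact h3 p h
                · simp at h
                  simp [h, hs])
              h2 h1 h0 (fun p hp => hx p (by simp [hp]))]
        simp [hs, List.append_assoc]

theorem sorted_buckets (xs : List (String × Int))
    (hx : ∀ p ∈ xs, p.2 = 0 ∨ p.2 = 1 ∨ p.2 = 2 ∨ p.2 = 3) :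
    PySem.List.sorted xs (fun x => x.2) true
      = xs.filter (fun p => decide (p.2 = 3)) ++ (xs.filter (fun p => decide (p.2 = 2))
        ++ (xs.filter (fun p => decide (p.2 = 1)) ++ xs.filter (fun p => decide (p.2 = 0)))) := by
  have := foldl_ins_buckets xs [] [] [] [] (by simp) (by simp) (by simp) (by simp) hx
  simpa using this

theorem A_fold (query : String) (xs : List String) (acc : List (String × Int)) :
    xs.foldl (pvBodyA query) acc = acc ++ xs.map (fun m => (m, pvScr query m)) := by
  induction xs generalizing acc with
  | nil => simp
  | cons x t ih =>
      rw [List.foldl_cons, pvBodyA_eq, ih]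
      simp

theorem B_fold (query : String) (xs : List String) (b0 b1 b2 b3 : List String) :
    xs.foldl (pvBodyB (PySem.Str.split₀ (PySem.Str.lower query))) (b0, b1, b2, b3)
    = (b0 ++ xs.filter (fun m => decide (pvScr query m = 0)),
       b1 ++ xs.filter (fun m => decide (pvScr query m = 1)),
       b2 ++ xs.filter (fun m => decide (pvScr query m = 2)),
       b3 ++ xs.filter (fun m => decide (pvScr query m = 3))) := by
  induction xs generalizing b0 b1 b2 b3 with
  | nil => simp
  | cons x t ih =>
      rw [List.foldl_cons]
      have hb : pvBodyB (PySem.Str.split₀ (PySem.Str.lower query)) (b0, b1, b2, b3) x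
          = if pvScr query x = 3 then (b0, b1, b2, b3 ++ [x])
            else if pvScr query x = 2 then (b0, b1, b2 ++ [x], b3)
            else if pvScr query x = 1 then (b0, b1 ++ [x], b2, b3)
            else (b0 ++ [x], b1, b2, b3) := rfl
      rw [hb]
      rcases pvScr_cases query x with hs | hs | hs | hs <;>
        · rw [hs]
          norm_num
          rw [ih]
          simp [hs, List.append_assoc]

-- ===== VERDICT (by name: the statement is the Claim_ definition above) =====
theorem rank_memories_spec : Claim_equal_rank_memories := by
  intro memories query _
  unfold Spec_rank_memories
  show (PySem.List.sorted (memories.foldl (pvBodyA query) []) (fun x => x.2) true).map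
        (fun m => m.1)
      = (memories.foldl (pvBodyB (PySem.Str.split₀ (PySem.Str.lower query)))
          ([], [], [], [])).2.2.2
        ++ (memories.foldl (pvBodyB (PySem.Str.split₀ (PySem.Str.lower query)))
          ([], [], [], [])).2.2.1
        ++ (memories.foldl (pvBodyB (PySem.Str.split₀ (PySem.Str.lower query)))
          ([], [], [], [])).2.1
        ++ (memories.foldl (pvBodyB (PySem.Str.split₀ (PySem.Str.lower query)))
          ([], [], [], [])).1
  rw [A_fold query memories [], B_fold query memories [] [] [] []]
  simp only [List.nil_append]
  rw [sorted_buckets _ (by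
        intro p hp
        simp at hp
        obtain ⟨m, _, rfl⟩ := hp
        exact pvScr_cases query m)]
  simp [List.filter_map, Function.comp_def, List.map_append, List.map_map]
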